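-- pv_equiv track=rewrite | github.com/Dmitro44/353503_SEBELEV_21 | IGI/LR3/IGI_Lab3/task3.py | count_chars_between_markers
-- ===== SOURCE A (Python) =====
-- def count_chars_between_markers(text):
--     """
--     Count characters between specified markers in a text string.
--
--     Args:
--         text: The input text to analyze
--
--     Returns:
--         Total number of characters between all pairs of start and end markers
--     """
--     count = 0
--     end_index = 0
--
--     while True:
--         start_index = text.find("f", end_index)
--         if start_index == -1:
--             break
--
--         end_index = text.find("y", start_index)
--         if end_index == -1:
--             break
--
--         # Count characters between markers (excluding the markers themselves)
--         count += end_index - start_index - 1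
--
--     return count
-- ===== SOURCE B (Python) =====
-- def count_chars_between_markers(text):
--     total = 0
--     inside = False
--     counter = 0
--     for ch in text:
--         if inside:
--             if ch == "y":
--                 total += counter
--                 inside = False
--             else:
--                 counter += 1
--         elif ch == "f":
--             inside = True
--             counter = 0
--     return total
-- ===== Notes on version B (the rewrite author's own statement) =====
-- stated objective: alternative
-- what changed: Replaced A's while-loop of repeated str.find calls tracking integer indices by a single character-by-character pass maintaining an inside-region flag and a per-region counter.
import Mathlib
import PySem

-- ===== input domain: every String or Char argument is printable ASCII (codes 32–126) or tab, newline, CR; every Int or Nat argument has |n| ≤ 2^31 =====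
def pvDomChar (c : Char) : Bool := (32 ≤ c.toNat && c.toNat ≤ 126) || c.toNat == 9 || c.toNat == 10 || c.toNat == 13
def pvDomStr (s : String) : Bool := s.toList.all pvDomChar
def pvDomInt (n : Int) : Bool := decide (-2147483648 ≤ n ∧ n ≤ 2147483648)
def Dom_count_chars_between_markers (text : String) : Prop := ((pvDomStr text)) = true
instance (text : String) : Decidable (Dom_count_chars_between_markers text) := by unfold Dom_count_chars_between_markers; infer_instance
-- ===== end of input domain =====

-- B replaces A's repeated str.find scanning by a single character-by-character pass
-- with an inside/counter state machine (objective: alternative decomposition, same cost).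

-- ===== PORT A =====
-- A's while-True loop with two text.find calls; fuel only makes the loop total
-- (each iteration strictly advances end_index, so text.length + 1 steps always suffice).
def ccbmLoopA (cs : List Char) : Nat → Int → Int → Int
  | 0, _, count => count
  | n + 1, e, count =>
    let s := PySem.Chars.findFrom cs ['f'] e
    if s = -1 then count
    else
      let e' := PySem.Chars.findFrom cs ['y'] s
      if e' = -1 then count
      else ccbmLoopA cs n e' (count + (e' - s - 1))

def count_chars_between_markers (text : String) : Int :=
  ccbmLoopA text.toList (text.toList.length + 1) 0 0

-- ===== PORT B =====
-- state = (total, inside, counter)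
def ccbmStepB (st : Int × Bool × Int) (ch : Char) : Int × Bool × Int :=
  if st.2.1 then
    if ch = 'y' then (st.1 + st.2.2, false, st.2.2) else (st.1, true, st.2.2 + 1)
  else if ch = 'f' then (st.1, true, 0) else st

def count_chars_between_markers_alt (text : String) : Int :=
  (text.toList.foldl ccbmStepB (0, false, 0)).1

-- ===== PRECONDITION & SPEC =====
def Spec_count_chars_between_markers (text : String) (out : Int) : Prop := out = count_chars_between_markers_alt text
instance (text : String) (out : Int) : Decidable (Spec_count_chars_between_markers text out) := by unfold Spec_count_chars_between_markers; infer_instance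

-- ===== CLAIM (what is proved, stated in full; the proofs are below) =====
def Claim_equal_count_chars_between_markers : Prop := ∀ (text : String), Dom_count_chars_between_markers text → Spec_count_chars_between_markers text (count_chars_between_markers text)

-- ===== LEMMAS AND PROOFS =====

-- reference spec: ccbmSpecOut t = chars counted scanning t from outside a region,
-- ccbmSpecIn t acc = same scanning from inside a region with acc chars so far.
mutual
def ccbmSpecOut : List Char → Int
  | [] => 0
  | c :: t => if c = 'f' then ccbmSpecIn t 0 else ccbmSpecOut t
def ccbmSpecIn : List Char → Int → Int
  | [], _ => 0
  | c :: t, acc => if c = 'y' then acc + ccbmSpecOut t else ccbmSpecIn t (acc + 1)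
end

lemma ccbmSpecOut_no_f (t : List Char) (h : 'f' ∉ t) : ccbmSpecOut t = 0 := by
  induction t with
  | nil => simp [ccbmSpecOut]
  | cons c t ih =>
    simp only [List.mem_cons, not_or] at h
    have hc : ¬ c = 'f' := fun hc => h.1 hc.symm
    simp [ccbmSpecOut, hc, ih h.2]

lemma ccbmSpecIn_no_y (t : List Char) (acc : Int) (h : 'y' ∉ t) : ccbmSpecIn t acc = 0 := by
  induction t generalizing acc with
  | nil => simp [ccbmSpecIn]
  | cons c t ih =>
    simp only [List.mem_cons, not_or] at h
    have hc : ¬ c = 'y' := fun hc => h.1 hc.symm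
    simp [ccbmSpecIn, hc, ih _ h.2]

lemma ccbmSpecOut_skip (u : List Char) (v : List Char) (h : 'f' ∉ u) :
    ccbmSpecOut (u ++ 'f' :: v) = ccbmSpecIn v 0 := by
  induction u with
  | nil => simp [ccbmSpecOut]
  | cons c u ih =>
    simp only [List.mem_cons, not_or] at h
    have hc : ¬ c = 'f' := fun hc => h.1 hc.symm
    simp [ccbmSpecOut, hc, ih h.2]

lemma ccbmSpecIn_skip (w : List Char) (v : List Char) (acc : Int) (h : 'y' ∉ w) :
    ccbmSpecIn (w ++ 'y' :: v) acc = acc + w.length + ccbmSpecOut v := by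
  induction w generalizing acc with
  | nil => simp [ccbmSpecIn]
  | cons c w ih =>
    simp only [List.mem_cons, not_or] at h
    have hc : ¬ c = 'y' := fun hc => h.1 hc.symm
    simp [ccbmSpecIn, hc, ih _ h.2]
    ring

-- find on a one-character needle decomposes the list at its first occurrence
lemma ccbm_find_decomp (t : List Char) (a : Char) (h : PySem.Chars.find t [a] ≠ -1) :
    ∃ u v, t = u ++ a :: v ∧ (u.length : Int) = PySem.Chars.find t [a] ∧ a ∉ u := by
  have h0 : 0 ≤ PySem.Chars.find t [a] := by
    have := PySem.Chars.neg_one_le_find t [a]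
    omega
  obtain ⟨hpre, hmin⟩ := PySem.Chars.find_spec (s := t) (sub := [a]) h0
  obtain ⟨r, hr⟩ := hpre
  have hlt : (PySem.Chars.find t [a]).toNat < t.length := by
    by_contra hge
    have hnil : t.drop (PySem.Chars.find t [a]).toNat = [] := List.drop_eq_nil_of_le (by omega)
    rw [hnil] at hr
    simp at hr
  refine ⟨t.take (PySem.Chars.find t [a]).toNat, r, ?_, ?_, ?_⟩
  · have hv : t.drop (PySem.Chars.find t [a]).toNat = a :: r := by
      simpa using hr.symm
    calc t = t.take (PySem.Chars.find t [a]).toNat ++ t.drop (PySem.Chars.find t [a]).toNat := by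
            simp
      _ = _ := by rw [hv]
  · simp [List.length_take]
    omega
  · intro hmem
    obtain ⟨i, hi, hget⟩ := List.getElem_of_mem hmem
    rw [List.length_take] at hi
    have hilen : i < t.length := by omega
    have hij : i < (PySem.Chars.find t [a]).toNat := by omega
    have hgi : t[i] = a := by
      rw [List.getElem_take] at hget
      exact hget
    apply hmin i hij
    refine ⟨t.drop (i + 1), ?_⟩
    rw [List.drop_eq_getElem_cons hilen, hgi]
    simp

lemma ccbm_find_eq_neg_one (t : List Char) (a : Char) (h : PySem.Chars.find t [a] = -1) :
    a ∉ t := by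
  intro hmem
  rw [PySem.Chars.find_eq_neg_one_iff] at h
  apply h
  obtain ⟨s, t2, hst⟩ := List.append_of_mem hmem
  exact ⟨s, t2, by simp [hst]⟩

-- A's loop computes count + ccbmSpecOut of the unscanned suffix
lemma ccbmLoopA_eq (n : Nat) : ∀ (cs : List Char) (k : Nat) (count : Int),
    k ≤ cs.length → cs.length - k < n →
    ccbmLoopA cs n (k : Int) count = count + ccbmSpecOut (cs.drop k) := by
  induction n with
  | zero => intro cs k count hk hn; omega
  | succ m ih =>
    intro cs k count hk hn
    have hfind := PySem.Chars.findFrom_natCast cs ['f'] k hk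
    rw [ccbmLoopA]
    by_cases h1 : PySem.Chars.find (cs.drop k) ['f'] = -1
    · rw [hfind]
      simp only [h1, if_pos]
      rw [ccbmSpecOut_no_f _ (ccbm_find_eq_neg_one _ _ h1)]
      ring
    · obtain ⟨u, v, hd, hu, hfu⟩ := ccbm_find_decomp (cs.drop k) 'f' h1
      have hj0 : 0 ≤ PySem.Chars.find (cs.drop k) ['f'] := by
        have := PySem.Chars.neg_one_le_find (cs.drop k) ['f']
        omega
      have hjcast : ((PySem.Chars.find (cs.drop k) ['f']).toNat : Int)
          = PySem.Chars.find (cs.drop k) ['f'] := Int.toNat_of_nonneg hj0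
      set j : Nat := (PySem.Chars.find (cs.drop k) ['f']).toNat with hjdef
      have hjulen : u.length = j := by
        have hcast : (u.length : Int) = (j : Int) := by rw [hu, hjcast]
        exact_mod_cast hcast
      have hdroplen : (cs.drop k).length = cs.length - k := by simp
      have hjlt : k + j < cs.length := by
        have h2 : j < (cs.drop k).length := by
          rw [hd]
          simp [hjulen]
        omega
      have hs : PySem.Chars.findFrom cs ['f'] (k : Int) = ((k + j : Nat) : Int) := by
        rw [hfind, if_neg h1, ← hjcast]
        push_cast
        ring
      have hdropkj : cs.drop (k + j) = 'f' :: v := by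
        have hstep : cs.drop (k + j) = (cs.drop k).drop j := by
          rw [List.drop_drop, Nat.add_comm]
        rw [hstep, hd, ← hjulen]
        simp
      have hkj_le : k + j ≤ cs.length := Nat.le_of_lt hjlt
      have hfind2 := PySem.Chars.findFrom_natCast cs ['y'] (k + j) hkj_le
      rw [hdropkj] at hfind2
      by_cases h2 : PySem.Chars.find ('f' :: v) ['y'] = -1
      · have hyv : 'y' ∉ v := by
          have hm := ccbm_find_eq_neg_one _ _ h2
          simp only [List.mem_cons, not_or] at hm
          exact hm.2
        have hzero : ccbmSpecOut (cs.drop k) = 0 := by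
          rw [hd, ccbmSpecOut_skip u v hfu, ccbmSpecIn_no_y v 0 hyv]
        rw [hs, hfind2, hzero]
        simp [h2]
      · obtain ⟨u2, v2, hd2, hu2, hyu2⟩ := ccbm_find_decomp ('f' :: v) 'y' h2
        have hj20 : 0 ≤ PySem.Chars.find ('f' :: v) ['y'] := by
          have := PySem.Chars.neg_one_le_find ('f' :: v) ['y']
          omega
        have hj2cast : ((PySem.Chars.find ('f' :: v) ['y']).toNat : Int)
            = PySem.Chars.find ('f' :: v) ['y'] := Int.toNat_of_nonneg hj20
        set j2 : Nat := (PySem.Chars.find ('f' :: v) ['y']).toNat with hj2def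
        have hu2len : u2.length = j2 := by
          have hcast : (u2.length : Int) = (j2 : Int) := by rw [hu2, hj2cast]
          exact_mod_cast hcast
        obtain ⟨w, hw, hvw⟩ : ∃ w, u2 = 'f' :: w ∧ v = w ++ 'y' :: v2 := by
          cases u2 with
          | nil => simp at hd2
          | cons c2 w =>
            simp only [List.cons_append, List.cons.injEq] at hd2
            exact ⟨w, by rw [hd2.1], hd2.2⟩
        have hyw : 'y' ∉ w := by
          intro hm
          exact hyu2 (by rw [hw]; exact List.mem_cons_of_mem _ hm)
        have hj2w : j2 = w.length + 1 := by
          rw [← hu2len, hw]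
          simp
        have he' : PySem.Chars.findFrom cs ['y'] ((k + j : Nat) : Int)
            = ((k + j + j2 : Nat) : Int) := by
          rw [hfind2, if_neg h2, ← hj2cast]
          push_cast
          ring
        rw [hs, he']
        rw [if_neg (by omega : ¬ ((k + j : Nat) : Int) = -1)]
        rw [if_neg (by omega : ¬ ((k + j + j2 : Nat) : Int) = -1)]
        have hvlen : v.length = w.length + 1 + v2.length := by
          rw [hvw]
          simp
          omega
        have hlencs : cs.length = k + j + 1 + v.length := by
          have h3 : (cs.drop (k + j)).length = cs.length - (k + j) := by simp
          rw [hdropkj] at h3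
          simp at h3
          omega
        have hk' : k + j + j2 ≤ cs.length := by omega
        have hm' : cs.length - (k + j + j2) < m := by omega
        have hdropk' : cs.drop (k + j + j2) = 'y' :: v2 := by
          have hstep2 : cs.drop (k + j + j2) = (cs.drop (k + j)).drop j2 := by
            rw [List.drop_drop, Nat.add_comm]
          rw [hstep2, hdropkj, hd2, ← hu2len]
          simp
        have hih := ih cs (k + j + j2) (count + (((k + j + j2 : Nat) : Int) - ((k + j : Nat) : Int) - 1)) hk' hm'
        rw [hih, hdropk']
        have hso : ccbmSpecOut ('y' :: v2) = ccbmSpecOut v2 := by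
          simp [ccbmSpecOut]
        rw [hso, hd, ccbmSpecOut_skip u v hfu, hvw, ccbmSpecIn_skip w v2 0 hyw]
        push_cast [hj2w]
        ring

-- B's fold computes total + spec of the rest, from either state
lemma ccbmFoldB (t : List Char) : ∀ (total ctr acc : Int),
    ((t.foldl ccbmStepB (total, false, ctr)).1 = total + ccbmSpecOut t) ∧
    ((t.foldl ccbmStepB (total, true, acc)).1 = total + ccbmSpecIn t acc) := by
  induction t with
  | nil => intro total ctr acc; simp [ccbmSpecOut, ccbmSpecIn]
  | cons c t ih =>
    intro total ctr acc
    constructor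
    · by_cases hc : c = 'f'
      · simp only [List.foldl_cons, ccbmStepB, hc, if_true, if_false]
        simp only [Bool.false_eq_true, if_false, reduceIte]
        rw [(ih total ctr 0).2]
        simp [ccbmSpecOut]
      · simp only [List.foldl_cons, ccbmStepB, hc]
        simp only [Bool.false_eq_true, if_false, reduceIte]
        rw [(ih total ctr acc).1]
        simp [ccbmSpecOut, hc]
    · by_cases hc : c = 'y'
      · simp only [List.foldl_cons, ccbmStepB, hc]
        simp only [reduceIte]
        rw [(ih (total + acc) acc acc).1]
        simp [ccbmSpecIn]
        ring
      · simp only [List.foldl_cons, ccbmStepB, hc]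
        simp only [reduceIte]
        rw [(ih total ctr (acc + 1)).2]
        simp [ccbmSpecIn, hc]

-- ===== VERDICT (by name: the statement is the Claim_ definition above) =====
theorem count_chars_between_markers_spec : Claim_equal_count_chars_between_markers := by
  intro text _
  unfold Spec_count_chars_between_markers count_chars_between_markers count_chars_between_markers_alt
  have hA := ccbmLoopA_eq (text.toList.length + 1) text.toList 0 0 (Nat.zero_le _) (by omega)
  have hB := (ccbmFoldB text.toList 0 0 0).1
  simp only [Nat.cast_zero] at hA
  rw [hA, hB]
  simp
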